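-- pv_equiv track=rewrite | github.com/jst0951/CodingTest | 프로그래머스/2/42888. 오픈채팅방/오픈채팅방.py | solution
-- ===== SOURCE A (Python) =====
-- def solution(record_list):
--     result = []
--
--     # 각 uuid별로 최종 이름을 저장한 dict
--     name_dict = {} # "uid1234" : "Muzi"
--     action_list = [] # ["Enter", "Leave", "Change"]
--     uuid_list = [] # ["uid1234", "uid4567"]
--     name_list = [] # ["Muzi", "Prodo"]
--
--     # 입력 변환 기록
--     for record in record_list:
--         splitted = record.split(' ')
--         action_list.append(splitted[0])
--         uuid_list.append(splitted[1])
--         if len(splitted) == 3: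
--             name_list.append(splitted[2])
--         else:
--             name_list.append(None)
--
--     # 이름 변경 처리
--     for i in range(len(record_list)):
--         action = action_list[i]
--         if action == "Enter" or action == "Change":
--             name_dict[uuid_list[i]] = name_list[i]
--
--     # 출력
--     for i in range(len(record_list)):
--         action = action_list[i]
--         uuid = uuid_list[i]
--         if action == "Enter":
--             result.append("%s님이 들어왔습니다." % name_dict[uuid])
--         elif action == "Leave":
--             result.append("%s님이 나갔습니다." % name_dict[uuid])
--
--     return result
-- ===== SOURCE B (Python) =====
-- def solution(record_list):
--     # Single reverse pass: the FIRST Enter/Change seen in reverse order carries the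
--     # final name (first-wins instead of A's forward overwrite); messages are deferred
--     # as (uid, template) events and formatted afterwards in forward order.
--     final = {}
--     events = []
--     for rec in reversed(record_list):
--         parts = rec.split(' ')
--         action, uid = parts[0], parts[1]
--         if (action == "Enter" or action == "Change") and uid not in final:
--             final[uid] = parts[2] if len(parts) == 3 else None
--         if action == "Enter":
--             events.append((uid, "%s님이 들어왔습니다."))
--         elif action == "Leave":
--             events.append((uid, "%s님이 나갔습니다."))
--     return [tmpl % final[uid] for uid, tmpl in reversed(events)]
-- ===== Notes on version B (the rewrite author's own statement) =====
-- stated objective: alternative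
-- what changed: B replaces A's three forward passes (columnar lists, overwrite dict, index output loop) with ONE reverse pass that fixes each uid's final name by first-wins (first Enter/Change met in reverse = last forward) while deferring messages as (uid, template) events, then formats the reversed event list.
import Mathlib
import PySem

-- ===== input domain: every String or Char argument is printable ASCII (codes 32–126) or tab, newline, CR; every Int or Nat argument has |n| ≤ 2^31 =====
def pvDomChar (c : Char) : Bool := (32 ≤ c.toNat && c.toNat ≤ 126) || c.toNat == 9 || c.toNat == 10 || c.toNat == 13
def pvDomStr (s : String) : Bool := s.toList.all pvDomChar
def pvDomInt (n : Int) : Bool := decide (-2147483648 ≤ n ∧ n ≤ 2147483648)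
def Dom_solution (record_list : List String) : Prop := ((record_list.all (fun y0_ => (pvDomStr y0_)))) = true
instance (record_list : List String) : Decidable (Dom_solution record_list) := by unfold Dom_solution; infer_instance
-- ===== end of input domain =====

-- B replaces A's three forward passes by one reverse pass (first-wins dict = final names,
-- deferred (uid, template) events) plus one formatting map; same cost, different traversal.

-- ===== PORT A =====
-- record.split(' ') — sep " " ≠ "" so split? is never none
def pySplit (s : String) : List String := (PySem.Str.split? s " ").getD []

def solution (record_list : List String) : List String :=
  -- pass 1: the three parallel lists (action_list, uuid_list, name_list)
  let t := record_list.foldl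
    (fun (st : List String × List String × List (Option String)) record =>
      let splitted := pySplit record
      (st.1 ++ [PySem.List.pyGetD splitted 0 ""],
       st.2.1 ++ [PySem.List.pyGetD splitted 1 ""],
       st.2.2 ++ [if splitted.length = 3 then some (PySem.List.pyGetD splitted 2 "") else none]))
    ([], [], [])
  let action_list := t.1
  let uuid_list := t.2.1
  let name_list := t.2.2
  -- pass 2: name_dict (splitted[1]/name_dict[uuid] raise outside Pre_; the defaults are never read inside Pre_)
  let name_dict := (PySem.List.pyRange 0 (record_list.length : Int)).foldl
    (fun (d : PySem.Dict String (Option String)) i =>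
      let action := PySem.List.pyGetD action_list i ""
      if action = "Enter" ∨ action = "Change" then
        d.insert (PySem.List.pyGetD uuid_list i "") (PySem.List.pyGetD name_list i none)
      else d)
    PySem.Dict.empty
  -- pass 3: output ('"%s…" % x' with a str-or-None x prints x or "None"; ported as that concatenation)
  (PySem.List.pyRange 0 (record_list.length : Int)).foldl
    (fun (result : List String) i =>
      let action := PySem.List.pyGetD action_list i ""
      let uuid := PySem.List.pyGetD uuid_list i ""
      if action = "Enter" then
        result ++ [(match (name_dict.get? uuid).getD none with | some s => s | none => "None") ++ "님이 들어왔습니다."]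
      else if action = "Leave" then
        result ++ [(match (name_dict.get? uuid).getD none with | some s => s | none => "None") ++ "님이 나갔습니다."]
      else result)
    []

-- ===== PORT B =====
def optStr : Option String → String
  | some s => s
  | none   => "None"

-- 'tmpl % v' with one str-or-None argument: exact here because each template contains exactly
-- one "%s" and str.replace does not rescan the inserted text
def pyFmt1 (tmpl : String) (v : Option String) : String :=
  PySem.Str.replace tmpl "%s" (optStr v)

def solution_alt (record_list : List String) : List String :=
  -- one pass over reversed(record_list): first-wins name dict + deferred events
  let st := record_list.reverse.foldl
    (fun (st : PySem.Dict String (Option String) × List (String × String)) rec =>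
      let p := pySplit rec
      let action := PySem.List.pyGetD p 0 ""
      let uid := PySem.List.pyGetD p 1 ""
      let final := if (action = "Enter" ∨ action = "Change") ∧ st.1.contains uid = false
        then st.1.insert uid (if p.length = 3 then some (PySem.List.pyGetD p 2 "") else none)
        else st.1
      let events := if action = "Enter" then st.2 ++ [(uid, "%s님이 들어왔습니다.")]
        else if action = "Leave" then st.2 ++ [(uid, "%s님이 나갔습니다.")]
        else st.2
      (final, events))
    (PySem.Dict.empty, [])
  -- '[tmpl % final[uid] for uid, tmpl in reversed(events)]' (final[uid] raises outside Pre_)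
  st.2.reverse.map (fun e => pyFmt1 e.2 ((st.1.get? e.1).getD none))

-- ===== PRECONDITION & SPEC =====
-- the uids stored into name_dict (the Enter/Change records, in order)
def enterUids (record_list : List String) : List String :=
  record_list.filterMap (fun r =>
    let p := pySplit r
    if PySem.List.pyGetD p 0 "" = "Enter" ∨ PySem.List.pyGetD p 0 "" = "Change"
    then some (PySem.List.pyGetD p 1 "") else none)

-- A record is "<action> <uid>" or "<action> <uid> <name>", e.g. "Enter uid1234 Muzi".
-- Pre_ = exactly where the Python A returns: every record has at least two space-separated
-- fields (else splitted[1] raises IndexError) and every Leave record's uid was stored by some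
-- Enter/Change record (else name_dict[uuid] raises KeyError)
def Pre_solution (record_list : List String) : Prop :=
  ∀ r ∈ record_list,
    2 ≤ (pySplit r).length ∧
    (PySem.List.pyGetD (pySplit r) 0 "" = "Leave" →
      PySem.List.pyGetD (pySplit r) 1 "" ∈ enterUids record_list)
instance (record_list : List String) : Decidable (Pre_solution record_list) := by
  unfold Pre_solution; infer_instance

def pvWitness_solution : List String := ["Enter u1 muzi", "Enter u2 prodo", "Change u1 ryan", "Leave u2"]

def Spec_solution (record_list : List String) (out : List String) : Prop := out = solution_alt record_list
instance (record_list : List String) (out : List String) : Decidable (Spec_solution record_list out) := by unfold Spec_solution; infer_instance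

-- ===== CLAIM (what is proved, stated in full; the proofs are below) =====
def Claim_equal_solution : Prop := ∀ (record_list : List String), Dom_solution record_list → Pre_solution record_list → Spec_solution record_list (solution record_list)

-- ===== LEMMAS AND PROOFS =====
def actF (r : String) : String := PySem.List.pyGetD (pySplit r) 0 ""
def uidF (r : String) : String := PySem.List.pyGetD (pySplit r) 1 ""
def nameF (r : String) : Option String :=
  if (pySplit r).length = 3 then some (PySem.List.pyGetD (pySplit r) 2 "") else none

def dictOf (l : List String) : PySem.Dict String (Option String) :=
  l.foldl (fun d r => if actF r = "Enter" ∨ actF r = "Change" then d.insert (uidF r) (nameF r) else d)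
    PySem.Dict.empty

def emitA (d : PySem.Dict String (Option String)) (r : String) : List String :=
  if actF r = "Enter" then [optStr ((d.get? (uidF r)).getD none) ++ "님이 들어왔습니다."]
  else if actF r = "Leave" then [optStr ((d.get? (uidF r)).getD none) ++ "님이 나갔습니다."]
  else []

-- the value the LAST matching Enter/Change record stores for uid k (tail of the list wins)
def lastName : List String → String → Option (Option String)
  | [], _ => none
  | r :: l, k =>
      (lastName l k).orElse (fun _ =>
        if (actF r = "Enter" ∨ actF r = "Change") ∧ uidF r = k then some (nameF r) else none)

-- B's reverse-pass dict, seen as a foldr (first Enter/Change in reverse wins)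
def revDict : List String → PySem.Dict String (Option String)
  | [] => PySem.Dict.empty
  | r :: l =>
      if (actF r = "Enter" ∨ actF r = "Change") ∧ (revDict l).contains (uidF r) = false
      then (revDict l).insert (uidF r) (nameF r)
      else revDict l

-- the deferred (uid, template) events, in forward order
def evList (r : String) : List (String × String) :=
  if actF r = "Enter" then [(uidF r, "%s님이 들어왔습니다.")]
  else if actF r = "Leave" then [(uidF r, "%s님이 나갔습니다.")]
  else []

-- ---------- A side ----------
lemma pass1_eq (l : List String) (a b : List String) (c : List (Option String)) :
    List.foldl (fun (st : List String × List String × List (Option String)) record =>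
      (st.1 ++ [PySem.List.pyGetD (pySplit record) 0 ""],
       st.2.1 ++ [PySem.List.pyGetD (pySplit record) 1 ""],
       st.2.2 ++ [if (pySplit record).length = 3 then some (PySem.List.pyGetD (pySplit record) 2 "") else none]))
      (a, b, c) l
    = (a ++ l.map actF, b ++ l.map uidF, c ++ l.map nameF) := by
  induction l generalizing a b c with
  | nil => simp
  | cons x xs ih => simp [List.foldl_cons, ih, actF, uidF, nameF]

lemma pyGetD_map_idx {α : Type} (f : String → α) (l : List String) (d : α) (i : Int)
    (h0 : 0 ≤ i) (h1 : i < (l.length : Int)) :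
    PySem.List.pyGetD (l.map f) i d = f (PySem.List.pyGetD l i "") := by
  rw [PySem.List.pyGetD_eq_getElem _ _ h0 (by simpa using h1),
      PySem.List.pyGetD_eq_getElem _ _ h0 h1]
  simp

lemma solution_eq (l : List String) : solution l = l.flatMap (emitA (dictOf l)) := by
  simp only [solution, pass1_eq, List.nil_append]
  rw [PySem.List.foldl_congr_mem _ _
        (fun (d : PySem.Dict String (Option String)) i =>
          if actF (PySem.List.pyGetD l i "") = "Enter" ∨ actF (PySem.List.pyGetD l i "") = "Change"
          then d.insert (uidF (PySem.List.pyGetD l i "")) (nameF (PySem.List.pyGetD l i ""))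
          else d) _
        (by
          intro acc i hi
          obtain ⟨h0, h1⟩ := PySem.List.mem_pyRange_one.1 hi
          rw [pyGetD_map_idx actF l "" i h0 h1, pyGetD_map_idx uidF l "" i h0 h1,
              pyGetD_map_idx nameF l none i h0 h1]),
      PySem.List.foldl_pyRange_zero_pyGetD' l ""
        (fun d r => if actF r = "Enter" ∨ actF r = "Change" then d.insert (uidF r) (nameF r) else d)
        PySem.Dict.empty]
  rw [PySem.List.foldl_congr_mem _ _
        (fun (res : List String) i => res ++ emitA (dictOf l) (PySem.List.pyGetD l i "")) _
        (by
          intro acc i hi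
          obtain ⟨h0, h1⟩ := PySem.List.mem_pyRange_one.1 hi
          rw [pyGetD_map_idx actF l "" i h0 h1, pyGetD_map_idx uidF l "" i h0 h1]
          unfold emitA dictOf optStr
          split_ifs with hE hL <;> simp_all),
      PySem.List.foldl_pyRange_zero_pyGetD' l ""
        (fun res r => res ++ emitA (dictOf l) r) [],
      PySem.List.foldl_append_eq_flatMap]
  simp

-- A's forward overwrite dict looks up to the last matching store
lemma dictOf_get?_aux (l : List String) (d0 : PySem.Dict String (Option String)) (k : String) :
    (l.foldl (fun d r => if actF r = "Enter" ∨ actF r = "Change" then d.insert (uidF r) (nameF r) else d) d0).get? k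
    = (lastName l k).orElse (fun _ => d0.get? k) := by
  induction l generalizing d0 with
  | nil => simp [lastName]
  | cons r l ih =>
      simp only [List.foldl_cons, ih, lastName]
      cases h : lastName l k with
      | some v => simp [Option.orElse]
      | none =>
          simp only [Option.orElse]
          by_cases hc : actF r = "Enter" ∨ actF r = "Change"
          · by_cases hk : uidF r = k
            · subst hk; simp [hc, PySem.Dict.get?_insert_self]
            · simp [hc, hk, PySem.Dict.get?_insert_of_ne _ _ (fun h' => hk h'.symm)]
          · simp [hc]

lemma dictOf_get? (l : List String) (k : String) :
    (dictOf l).get? k = lastName l k := by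
  rw [dictOf, dictOf_get?_aux]
  cases h : lastName l k <;> simp [Option.orElse]

-- B's reverse first-wins dict looks up to the same value
lemma revDict_get? (l : List String) (k : String) :
    (revDict l).get? k = lastName l k := by
  induction l with
  | nil => simp [revDict, lastName]
  | cons r l ih =>
      simp only [revDict, lastName]
      by_cases hc : actF r = "Enter" ∨ actF r = "Change"
      · by_cases hk : uidF r = k
        · subst hk
          cases hcont : (revDict l).contains (uidF r) with
          | false =>
              have hn : (revDict l).get? (uidF r) = none := by
                have := PySem.Dict.contains_eq_isSome_get? (d := revDict l) (k := uidF r)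
                rw [hcont] at this
                cases hg : (revDict l).get? (uidF r) <;> simp_all
              simp [hc, PySem.Dict.get?_insert_self, ← ih, hn, Option.orElse]
          | true =>
              have hs : ((revDict l).get? (uidF r)).isSome = true := by
                rw [← PySem.Dict.contains_eq_isSome_get?]; exact hcont
              obtain ⟨v, hv⟩ := Option.isSome_iff_exists.mp hs
              simp [hc, ← ih, hv, Option.orElse]
        · have hne : k ≠ uidF r := fun h' => hk h'.symm
          have hite : (if (actF r = "Enter" ∨ actF r = "Change") ∧ uidF r = k
              then some (nameF r) else none) = none := by simp [hk]
          rw [hite]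
          split_ifs with h
          · rw [PySem.Dict.get?_insert_of_ne _ _ hne, ih]
            cases lastName l k <;> simp [Option.orElse]
          · rw [ih]; cases lastName l k <;> simp [Option.orElse]
      · simp only [hc, false_and, if_false]
        rw [ih]; cases lastName l k <;> simp [Option.orElse]

lemma revDict_cons (r : String) (l : List String) :
    revDict (r :: l) =
      if (actF r = "Enter" ∨ actF r = "Change") ∧ (revDict l).contains (uidF r) = false
      then (revDict l).insert (uidF r) (nameF r)
      else revDict l := rfl

-- the reverse fold of B, componentwise
lemma b_fold_eq (l : List String) :
    l.reverse.foldl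
      (fun (st : PySem.Dict String (Option String) × List (String × String)) rec =>
        let p := pySplit rec
        let action := PySem.List.pyGetD p 0 ""
        let uid := PySem.List.pyGetD p 1 ""
        let final := if (action = "Enter" ∨ action = "Change") ∧ st.1.contains uid = false
          then st.1.insert uid (if p.length = 3 then some (PySem.List.pyGetD p 2 "") else none)
          else st.1
        let events := if action = "Enter" then st.2 ++ [(uid, "%s님이 들어왔습니다.")]
          else if action = "Leave" then st.2 ++ [(uid, "%s님이 나갔습니다.")]
          else st.2
        (final, events))
      (PySem.Dict.empty, [])
    = (revDict l, (l.flatMap evList).reverse) := by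
  rw [List.foldl_reverse]
  induction l with
  | nil => simp [revDict]
  | cons r l ih =>
      simp only [List.foldr_cons, ih, List.flatMap_cons, List.reverse_append]
      rw [revDict_cons]
      simp only [evList, actF, uidF, nameF]
      by_cases hE : PySem.List.pyGetD (pySplit r) 0 "" = "Enter" <;>
        by_cases hL : PySem.List.pyGetD (pySplit r) 0 "" = "Leave" <;>
          by_cases hC : PySem.List.pyGetD (pySplit r) 0 "" = "Change" <;>
            simp_all

lemma emitA_eq_evList (d : PySem.Dict String (Option String)) (r : String) :
    emitA d r = (evList r).map (fun e => pyFmt1 e.2 ((d.get? e.1).getD none)) := by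
  unfold emitA evList
  have h1 : ∀ v, pyFmt1 "%s님이 들어왔습니다." v = optStr v ++ "님이 들어왔습니다." := by
    intro v; simp [pyFmt1, PySem.Str.replace, PySem.Chars.replace, PySem.Chars.replace.go]
  have h2 : ∀ v, pyFmt1 "%s님이 나갔습니다." v = optStr v ++ "님이 나갔습니다." := by
    intro v; simp [pyFmt1, PySem.Str.replace, PySem.Chars.replace, PySem.Chars.replace.go]
  split_ifs <;> simp [h1, h2]

lemma solution_alt_eq (l : List String) :
    solution_alt l = l.flatMap (emitA (revDict l)) := by
  simp only [solution_alt, b_fold_eq, List.reverse_reverse]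
  rw [List.map_flatMap]
  exact (List.flatMap_congr (fun r _ => (emitA_eq_evList (revDict l) r).symm))

-- ===== VERDICT (by name: the statement is the Claim_ definition above) =====
theorem solution_spec : Claim_equal_solution := by
  intro record_list _hdom _hpre
  unfold Spec_solution
  rw [solution_eq, solution_alt_eq]
  apply List.flatMap_congr
  intro r _
  unfold emitA
  rw [dictOf_get?, revDict_get?]
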